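-- pv_equiv track=rewrite | github.com/jeeeyuu/ScaffoldOrganizer | app/ui.py | _find_markdown_table
-- ===== SOURCE A (Python) =====
-- def _find_markdown_table(lines: list[str]) -> str | None:
--     candidate_blocks: list[list[str]] = []
--     current: list[str] = []
--     for line in lines:
--         if "|" in line:
--             current.append(line)
--         else:
--             if len(current) >= 2:
--                 candidate_blocks.append(current)
--             current = []
--     if len(current) >= 2:
--         candidate_blocks.append(current)
--     if not candidate_blocks:
--         return None
--     # Prefer blocks that contain header separators or Rank/Priority labels.
--     def score(block: list[str]) -> int:
--         score_val = 0
--         header = block[0]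
--         if "rank" in header.lower() or "priority" in header.lower() or "🔢" in header:
--             score_val += 3
--         if any("---" in line or ":--" in line for line in block[1:3]):
--             score_val += 2
--         score_val += len(block)
--         return score_val
--
--     best = max(candidate_blocks, key=score)
--     return "\n".join(best)
-- ===== SOURCE B (Python) =====
-- def _find_markdown_table(lines: list[str]) -> str | None:
--     # Different algorithm: no blocks are ever accumulated. First build a suffix
--     # run-length array run[i] = number of consecutive '|'-lines starting at i
--     # (computed right-to-left, DP-style); then jump-scan the indices: at each
--     # run start of length >= 2 score the slice and keep the best (strict '>'
--     # keeps the earliest block, like max(key=...)), skipping run lengths ahead.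
--     def score(block: list[str]) -> int:
--         score_val = 0
--         header = block[0]
--         if "rank" in header.lower() or "priority" in header.lower() or "🔢" in header:
--             score_val += 3
--         if any("---" in line or ":--" in line for line in block[1:3]):
--             score_val += 2
--         score_val += len(block)
--         return score_val
--
--     n = len(lines)
--     run = [0] * (n + 1)
--     for i in range(n - 1, -1, -1):
--         run[i] = run[i + 1] + 1 if "|" in lines[i] else 0
--
--     best = None  # (score, start, length)
--     i = 0
--     while i < n:
--         L = run[i]
--         if L >= 2:
--             s = score(lines[i:i + L])
--             if best is None or s > best[0]:
--                 best = (s, i, L)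
--         i += L if L else 1
--     if best is None:
--         return None
--     _, bi, bL = best
--     return "\n".join(lines[bi:bi + bL])
-- ===== Notes on version B (the rewrite author's own statement) =====
-- stated objective: alternative
-- what changed: Replaces A's accumulate-candidate-blocks-then-max(key=score) by an index-based algorithm: a right-to-left suffix run-length array run[i], then a jump scan over indices that scores each run start of length >= 2 via a slice and keeps the best-so-far (strict > preserves max's first-wins tie-breaking), never building a list of blocks.
import Mathlib
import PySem

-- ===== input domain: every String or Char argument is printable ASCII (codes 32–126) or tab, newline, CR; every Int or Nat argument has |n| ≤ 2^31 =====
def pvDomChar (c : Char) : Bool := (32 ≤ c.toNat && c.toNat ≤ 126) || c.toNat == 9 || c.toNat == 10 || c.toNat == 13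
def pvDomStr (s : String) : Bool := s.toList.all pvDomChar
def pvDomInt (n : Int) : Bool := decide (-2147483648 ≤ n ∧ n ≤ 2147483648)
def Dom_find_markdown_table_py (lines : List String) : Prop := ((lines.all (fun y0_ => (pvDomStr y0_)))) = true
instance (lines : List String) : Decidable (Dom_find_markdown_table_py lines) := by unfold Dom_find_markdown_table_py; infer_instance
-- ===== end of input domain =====

-- B replaces A's accumulate-blocks-then-max(key=score) by a suffix run-length array plus an
-- index-jump scan that scores each run start directly from slices (alternative algorithm, same cost).


-- ===== PORT A =====
-- '"|" in line', the membership test both programs use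
def pvPipe (line : String) : Bool := PySem.Str.isIn "|" line

-- score(block): identical code in A and B, defined once.
-- block[0] is ported as headD "": both programs only ever call score on blocks of length ≥ 2.
def pvScore (block : List String) : Int :=
  let header := block.headD ""
  let s1 : Int :=
    if PySem.Str.isIn "rank" (PySem.Str.lower header)
        || PySem.Str.isIn "priority" (PySem.Str.lower header)
        || PySem.Str.isIn "🔢" header then 3 else 0
  let s2 : Int :=
    if (PySem.List.slice block (some 1) (some 3)).any
        (fun line => PySem.Str.isIn "---" line || PySem.Str.isIn ":--" line)
    then s1 + 2 else s1
  s2 + block.length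

def find_markdown_table_py (lines : List String) : Option String :=
  let st := lines.foldl
    (fun (p : List (List String) × List String) line =>
      if pvPipe line then (p.1, p.2 ++ [line])
      else if 2 ≤ p.2.length then (p.1 ++ [p.2], []) else (p.1, []))
    ([], [])
  let blocks := if 2 ≤ st.2.length then st.1 ++ [st.2] else st.1
  match PySem.List.max? blocks pvScore with
  | none => none
  | some best => some (PySem.Str.join "\n" best)

-- ===== PORT B =====
-- run = [0]*(n+1); for i in range(n-1,-1,-1): run[i] = run[i+1]+1 if "|" in lines[i] else 0
-- built right-to-left, i.e. as a fold from the right over lines onto [0].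
def pvRuns (lines : List String) : List Nat :=
  lines.foldr (fun line acc => (if pvPipe line then acc.headD 0 + 1 else 0) :: acc) [0]

-- the while loop: i starts at 0, jumps by (L if L else 1); run[i] read with getD
-- (i is always in range: i < n < (pvRuns lines).length).
def pvScanLoop (lines : List String) (run : List Nat) (n : Nat) (i : Nat)
    (best : Option (Int × Nat × Nat)) : Option (Int × Nat × Nat) :=
  if _h : i < n then
    let L := run.getD i 0
    let best' :=
      if 2 ≤ L then
        let s := pvScore (PySem.List.slice lines (some (i : Int)) (some ((i : Int) + (L : Int))))
        match best with
        | none => some (s, i, L)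
        | some (bs, bi, bL) => if s > bs then some (s, i, L) else some (bs, bi, bL)
      else best
    pvScanLoop lines run n (i + (if L = 0 then 1 else L)) best'
  else best
  termination_by n - i
  decreasing_by split <;> omega

def find_markdown_table_py_alt (lines : List String) : Option String :=
  let n := lines.length
  let run := pvRuns lines
  match pvScanLoop lines run n 0 none with
  | none => none
  | some (_, bi, bL) =>
      some (PySem.Str.join "\n" (PySem.List.slice lines (some (bi : Int)) (some ((bi : Int) + (bL : Int)))))

-- ===== PRECONDITION & SPEC =====
def Spec_find_markdown_table_py (lines : List String) (out : Option String) : Prop := out = find_markdown_table_py_alt lines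
instance (lines : List String) (out : Option String) : Decidable (Spec_find_markdown_table_py lines out) := by unfold Spec_find_markdown_table_py; infer_instance

-- ===== CLAIM (what is proved, stated in full; the proofs are below) =====
def Claim_equal_find_markdown_table_py : Prop := ∀ (lines : List String), Dom_find_markdown_table_py lines → Spec_find_markdown_table_py lines (find_markdown_table_py lines)

-- ===== LEMMAS AND PROOFS =====

-- canonical block decomposition: pvG cur ls = the candidate blocks A flushes when the
-- current run is cur and the remaining lines are ls
def pvG (cur : List String) : List String → List (List String)
  | [] => if 2 ≤ cur.length then [cur] else []
  | l :: ls =>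
      if pvPipe l then pvG (cur ++ [l]) ls
      else (if 2 ≤ cur.length then [cur] else []) ++ pvG [] ls

def pvBlocks (ls : List String) : List (List String) := pvG [] ls

-- A's fold-and-flush computes pvG
lemma pvG_spec (ls : List String) : ∀ (acc : List (List String)) (cur : List String),
    (if 2 ≤ (ls.foldl
        (fun (p : List (List String) × List String) line =>
          if pvPipe line then (p.1, p.2 ++ [line])
          else if 2 ≤ p.2.length then (p.1 ++ [p.2], []) else (p.1, []))
        (acc, cur)).2.length
     then (ls.foldl
        (fun (p : List (List String) × List String) line =>
          if pvPipe line then (p.1, p.2 ++ [line])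
          else if 2 ≤ p.2.length then (p.1 ++ [p.2], []) else (p.1, []))
        (acc, cur)).1 ++ [(ls.foldl
        (fun (p : List (List String) × List String) line =>
          if pvPipe line then (p.1, p.2 ++ [line])
          else if 2 ≤ p.2.length then (p.1 ++ [p.2], []) else (p.1, []))
        (acc, cur)).2]
     else (ls.foldl
        (fun (p : List (List String) × List String) line =>
          if pvPipe line then (p.1, p.2 ++ [line])
          else if 2 ≤ p.2.length then (p.1 ++ [p.2], []) else (p.1, []))
        (acc, cur)).1)
    = acc ++ pvG cur ls := by
  induction ls with
  | nil =>
    intro acc cur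
    simp only [List.foldl_nil, pvG]
    split <;> simp
  | cons l ls ih =>
    intro acc cur
    simp only [List.foldl_cons, pvG]
    by_cases hp : pvPipe l = true
    · simp only [hp, if_pos]
      exact ih acc (cur ++ [l])
    · simp only [hp, Bool.false_eq_true, if_false]
      by_cases hc : 2 ≤ cur.length
      · simp only [hc, if_pos]
        rw [ih (acc ++ [cur]) []]
        simp
      · simp only [hc, if_false]
        rw [ih acc []]
        simp
  -- N.B. the three identical foldl occurrences are A's single `st`

-- pvG cur ls emits cur ++ (leading run of ls) and restarts after it
lemma pvG_run (ls : List String) : ∀ (cur : List String),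
    pvG cur ls =
      (if 2 ≤ (cur ++ ls.takeWhile pvPipe).length then [cur ++ ls.takeWhile pvPipe] else [])
        ++ pvG [] (ls.dropWhile pvPipe) := by
  induction ls with
  | nil => intro cur; simp [pvG]
  | cons l ls ih =>
    intro cur
    by_cases hp : pvPipe l = true
    · rw [show pvG cur (l :: ls) = pvG (cur ++ [l]) ls from by simp [pvG, hp],
        ih (cur ++ [l])]
      simp [hp]
    · rw [show pvG cur (l :: ls)
          = (if 2 ≤ cur.length then [cur] else []) ++ pvG [] ls from by simp [pvG, hp],
        List.takeWhile_cons, List.dropWhile_cons]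
      simp only [hp, Bool.false_eq_true, if_false, List.append_nil]
      rw [show pvG [] (l :: ls) = pvG [] ls from by simp [pvG, hp]]

lemma pvRuns_ne_nil (ls : List String) : pvRuns ls ≠ [] := by
  cases ls <;> simp [pvRuns]

-- the run-length array is pointwise the front-run length of the suffix
lemma pvRuns_getD (lines : List String) : ∀ (i : Nat),
    (pvRuns lines).getD i 0 = ((lines.drop i).takeWhile pvPipe).length := by
  induction lines with
  | nil => intro i; cases i <;> simp [pvRuns]
  | cons l ls ih =>
    intro i
    rw [show pvRuns (l :: ls) = (if pvPipe l then (pvRuns ls).headD 0 + 1 else 0) :: pvRuns ls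
        from rfl]
    cases i with
    | zero =>
      obtain ⟨a, t, hat⟩ := List.exists_cons_of_ne_nil (pvRuns_ne_nil ls)
      have h0 : a = (ls.takeWhile pvPipe).length := by
        have h := ih 0
        rw [List.drop_zero, hat] at h
        simpa using h
      by_cases hp : pvPipe l = true
      · simp [hat, hp, h0]
      · simp [hp]
    | succ j => simpa using ih j

lemma take_takeWhile {α : Type} (p : α → Bool) (l : List α) :
    l.take (l.takeWhile p).length = l.takeWhile p := by
  induction l with
  | nil => simp
  | cons x xs ih =>
    by_cases hp : p x <;> simp [hp, ih]

lemma drop_takeWhile {α : Type} (p : α → Bool) (l : List α) :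
    l.drop (l.takeWhile p).length = l.dropWhile p := by
  induction l with
  | nil => simp
  | cons x xs ih =>
    by_cases hp : p x <;> simp [hp, ih]

-- one step of PySem.List.max? (first maximum: strict replacement)
def pvMStep (m : Option (List String)) (c : List String) : Option (List String) :=
  match m with
  | none => some c
  | some x => if pvScore x < pvScore c then some c else some x

lemma max?_append_singleton (xs : List (List String)) (c : List String) :
    PySem.List.max? (xs ++ [c]) pvScore = pvMStep (PySem.List.max? xs pvScore) c := by
  unfold PySem.List.max? pvMStep
  rw [List.foldl_append, List.foldl_cons, List.foldl_nil]
  split <;> rename_i heq <;> rw [heq]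

lemma max?_eq_foldl (ys : List (List String)) : ∀ (xs : List (List String)),
    PySem.List.max? (xs ++ ys) pvScore = ys.foldl pvMStep (PySem.List.max? xs pvScore) := by
  induction ys with
  | nil => intro xs; simp
  | cons c ys ih =>
    intro xs
    rw [show xs ++ c :: ys = (xs ++ [c]) ++ ys by simp, ih (xs ++ [c]),
      max?_append_singleton, List.foldl_cons]

-- relation between B's best triple and the first-maximum block
def pvRel (lines : List String) (best : Option (Int × Nat × Nat)) (m : Option (List String)) : Prop :=
  (best = none ∧ m = none) ∨
  (∃ s bi bL blk, best = some (s, bi, bL) ∧ m = some blk ∧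
    PySem.List.slice lines (some (bi : Int)) (some ((bi : Int) + (bL : Int))) = blk ∧
    s = pvScore blk)

lemma scan_inv (lines : List String) : ∀ (d i : Nat) (best : Option (Int × Nat × Nat))
    (m : Option (List String)), lines.length - i = d → i ≤ lines.length →
    pvRel lines best m →
    pvRel lines (pvScanLoop lines (pvRuns lines) lines.length i best)
      ((pvBlocks (lines.drop i)).foldl pvMStep m) := by
  intro d
  induction d using Nat.strong_induction_on with
  | _ d ih =>
    intro i best m hd hi hrel
    by_cases hlt : i < lines.length
    · rw [pvScanLoop, dif_pos hlt]
      dsimp only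
      have hL : (pvRuns lines).getD i 0 = ((lines.drop i).takeWhile pvPipe).length :=
        pvRuns_getD lines i
      set s := lines.drop i with hs
      set L := (pvRuns lines).getD i 0 with hLdef
      have hpre : (s.takeWhile pvPipe).length ≤ s.length :=
        (List.takeWhile_prefix pvPipe).length_le
      have hslen : s.length = lines.length - i := by rw [hs, List.length_drop]
      have hdropL : lines.drop (i + L) = s.dropWhile pvPipe := by
        rw [hL, ← drop_takeWhile pvPipe s, hs, List.drop_drop]
      have hslice : PySem.List.slice lines (some (i : Int)) (some ((i : Int) + (L : Int)))
          = s.takeWhile pvPipe := by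
        rw [PySem.List.slice_natCast_add, ← hs, ← take_takeWhile pvPipe s, hL]
      by_cases h2 : 2 ≤ L
      · -- emit the run, jump past it
        have hL0 : ¬ L = 0 := by omega
        have hiL : i + L ≤ lines.length := by rw [hL]; omega
        have hblocks : pvBlocks s = (s.takeWhile pvPipe) :: pvBlocks (s.dropWhile pvPipe) := by
          unfold pvBlocks
          rw [pvG_run s []]
          simp only [List.nil_append]
          rw [if_pos (by rw [← hL]; exact h2)]
          rfl
        rw [hblocks, List.foldl_cons, if_pos h2, if_neg hL0]
        rcases hrel with ⟨hb, hm⟩ | ⟨s0, bi0, bL0, blk, hb, hm, hsl, hsc⟩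
        · subst hb; subst hm
          have hstep := ih (lines.length - (i + L)) (by omega) (i + L)
            (some (pvScore (PySem.List.slice lines (some (i : Int))
              (some ((i : Int) + (L : Int)))), i, L))
            (some (s.takeWhile pvPipe)) rfl hiL
            (Or.inr ⟨_, i, L, _, rfl, rfl, hslice, by rw [hslice]⟩)
          rw [hdropL] at hstep
          exact hstep
        · subst hb; subst hm; subst hsc
          dsimp only
          by_cases hgt : pvScore blk < pvScore (s.takeWhile pvPipe)
          · have hgt' : pvScore (PySem.List.slice lines (some (i : Int))
                (some ((i : Int) + (L : Int)))) > pvScore blk := by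
              rw [hslice]; exact hgt
            rw [if_pos hgt',
              show pvMStep (some blk) (s.takeWhile pvPipe) = some (s.takeWhile pvPipe) from by
                simp [pvMStep, hgt]]
            have hstep := ih (lines.length - (i + L)) (by omega) (i + L)
              (some (pvScore (PySem.List.slice lines (some (i : Int))
                (some ((i : Int) + (L : Int)))), i, L))
              (some (s.takeWhile pvPipe)) rfl hiL
              (Or.inr ⟨_, i, L, _, rfl, rfl, hslice, by rw [hslice]⟩)
            rw [hdropL] at hstep
            exact hstep
          · have hgt' : ¬ pvScore (PySem.List.slice lines (some (i : Int))
                (some ((i : Int) + (L : Int)))) > pvScore blk := by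
              rw [hslice]; exact hgt
            rw [if_neg hgt',
              show pvMStep (some blk) (s.takeWhile pvPipe) = some blk from by
                simp [pvMStep, hgt]]
            have hstep := ih (lines.length - (i + L)) (by omega) (i + L)
              (some (pvScore blk, bi0, bL0)) (some blk) rfl hiL
              (Or.inr ⟨_, bi0, bL0, blk, rfl, rfl, hsl, rfl⟩)
            rw [hdropL] at hstep
            exact hstep
      · -- no block here: skip (1 if L = 0 else L); the block list is unchanged
        have hbl : pvBlocks (lines.drop (i + (if L = 0 then 1 else L))) = pvBlocks s := by
          by_cases hL0 : L = 0
          · -- head of s is a non-pipe line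
            have hsne : s ≠ [] := by rw [hs]; simp [List.drop_eq_nil_iff]; omega
            obtain ⟨a, t, hst⟩ := List.exists_cons_of_ne_nil hsne
            have hpa : pvPipe a = false := by
              cases hq : pvPipe a
              · rfl
              · exfalso
                have h1 : 1 ≤ (s.takeWhile pvPipe).length := by
                  rw [hst, List.takeWhile_cons, if_pos hq]
                  simp
                omega
            have hdr : lines.drop (i + 1) = t := by
              have : s.drop 1 = t := by rw [hst]; rfl
              rw [← this, hs, List.drop_drop]
            rw [if_pos hL0, hdr, hst]
            unfold pvBlocks
            conv_rhs => rw [show pvG [] (a :: t) = pvG [] t from by simp [pvG, hpa]]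
          · -- L = 1: skip the singleton pipe run; it generates no block
            rw [if_neg hL0, hdropL]
            unfold pvBlocks
            conv_rhs => rw [pvG_run s []]
            rw [if_neg (by simp only [List.nil_append]; omega)]
            rfl
        have hnext : i + (if L = 0 then 1 else L) ≤ lines.length := by
          split <;> omega
        have hstep := ih (lines.length - (i + (if L = 0 then 1 else L)))
          (by split <;> omega) (i + (if L = 0 then 1 else L)) best m rfl hnext hrel
        rw [hbl] at hstep
        rw [if_neg h2]
        exact hstep
    · -- loop exit
      have hin : i = lines.length := by omega
      rw [pvScanLoop, dif_neg hlt]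
      subst hin
      simpa [pvBlocks, pvG] using hrel

-- ===== VERDICT (by name: the statement is the Claim_ definition above) =====
theorem find_markdown_table_py_spec : Claim_equal_find_markdown_table_py := by
  intro lines _
  show find_markdown_table_py lines = find_markdown_table_py_alt lines
  unfold find_markdown_table_py find_markdown_table_py_alt
  dsimp only
  rw [pvG_spec lines [] [], List.nil_append]
  have hmax : PySem.List.max? (pvBlocks lines) pvScore
      = (pvBlocks lines).foldl pvMStep (none : Option (List String)) := by
    have h := max?_eq_foldl (pvBlocks lines) []
    simpa [PySem.List.max?] using h
  have hB := scan_inv lines (lines.length - 0) 0 none none rfl (Nat.zero_le _)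
    (Or.inl ⟨rfl, rfl⟩)
  rw [List.drop_zero] at hB
  rcases hB with ⟨hb, hm⟩ | ⟨s0, bi, bL, blk, hb, hm, hsl, _⟩
  · rw [hb, show PySem.List.max? (pvG [] lines) pvScore = none from by
      rw [show pvG [] lines = pvBlocks lines from rfl, hmax, hm]]
  · rw [hb, show PySem.List.max? (pvG [] lines) pvScore = some blk from by
      rw [show pvG [] lines = pvBlocks lines from rfl, hmax, hm]]
    dsimp only
    rw [hsl]
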